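-- pv_equiv track=rewrite | github.com/topikuning/marlinv2 | backend/seed.py | _expand_permission_globs
-- ===== SOURCE A (Python) =====
-- def _expand_permission_globs(permission_codes, all_perm_codes):
--     """Expand patterns like 'master.*' or '*'."""
--     out = set()
--     for p in permission_codes:
--         if p == "*":
--             return set(all_perm_codes)
--         if p.endswith(".*"):
--             prefix = p[:-2]
--             out.update(c for c in all_perm_codes if c.startswith(prefix + "."))
--         else:
--             out.add(p)
--     return out
-- ===== SOURCE B (Python) =====
-- def _expand_permission_globs(permission_codes, all_perm_codes):
--     """Expand patterns like 'master.*' or '*'."""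
--     if "*" in permission_codes:
--         return set(all_perm_codes)
--     # inverted index: register each candidate under every dot-boundary prefix,
--     # so a glob 'pref.*' is answered by a single dict lookup
--     index = {}
--     for c in all_perm_codes:
--         pref = ""
--         for ch in c:
--             if ch == ".":
--                 index.setdefault(pref, []).append(c)
--             pref += ch
--     out = set()
--     for p in permission_codes:
--         if p.endswith(".*"):
--             out.update(index.get(p[:-2], []))
--         else:
--             out.add(p)
--     return out
-- ===== Notes on version B (the rewrite author's own statement) =====
-- stated objective: alternative
-- what changed: Hoists the '*' check to a membership pre-test and replaces A's per-pattern scan over all candidates by an inverted index (dot-boundary prefix -> matching candidates) built once from the candidates, so each glob is answered by one dict lookup.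
import Mathlib
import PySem

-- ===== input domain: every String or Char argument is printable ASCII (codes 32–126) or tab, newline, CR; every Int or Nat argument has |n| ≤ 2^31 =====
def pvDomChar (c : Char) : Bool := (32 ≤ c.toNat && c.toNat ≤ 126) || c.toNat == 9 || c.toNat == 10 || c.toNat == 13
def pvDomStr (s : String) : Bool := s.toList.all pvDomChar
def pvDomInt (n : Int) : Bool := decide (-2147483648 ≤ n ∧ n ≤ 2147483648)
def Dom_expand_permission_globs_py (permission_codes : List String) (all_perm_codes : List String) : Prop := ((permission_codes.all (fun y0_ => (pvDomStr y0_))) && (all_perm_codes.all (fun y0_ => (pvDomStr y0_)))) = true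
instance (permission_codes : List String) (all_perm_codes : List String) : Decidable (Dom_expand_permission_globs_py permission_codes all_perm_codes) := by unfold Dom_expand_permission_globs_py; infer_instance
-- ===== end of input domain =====

-- B replaces A's per-pattern scan of all candidates by a '*' membership pre-check plus an
-- inverted index (dot-boundary prefix → matching candidates) built once from the candidates,
-- so each glob pattern is answered by a single dict lookup (same return value).

-- ===== PORT A =====
-- A's loop 'for p in permission_codes', accumulator 'out', early return on '*'
def pvA_go (all_perm_codes : List String) (perms : List String) (out : PySem.Set String) : PySem.Set String :=
  match perms with
  | [] => out
  | p :: rest =>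
    if p == "*" then PySem.Set.ofList all_perm_codes
    else if PySem.Str.endswith p ".*" then
      pvA_go all_perm_codes rest
        (PySem.Set.update out
          (all_perm_codes.filter (fun c =>
            PySem.Str.startswith c (PySem.Str.slice p none (some (-2)) ++ "."))))
    else pvA_go all_perm_codes rest (PySem.Set.add out p)

def expand_permission_globs_py (permission_codes : List String) (all_perm_codes : List String) : List String :=
  pvA_go all_perm_codes permission_codes PySem.Set.empty

-- ===== PORT B =====
-- Source B's inner loop 'for ch in c: if ch == ".": index.setdefault(pref, []).append(c); pref += ch'
def pvIndexInner (c : String) (chars : List Char) (pref : String)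
    (d : PySem.Dict String (List String)) : PySem.Dict String (List String) :=
  match chars with
  | [] => d
  | ch :: rest =>
      pvIndexInner c rest (pref.push ch)
        (if ch == '.' then d.modify pref [] (· ++ [c]) else d)

-- Source B's index-building loop 'for c in all_perm_codes: …'
def pvIndexOf (all_perm_codes : List String) : PySem.Dict String (List String) :=
  all_perm_codes.foldl (fun d c => pvIndexInner c c.toList "" d) PySem.Dict.empty

-- Source B's pattern loop (no '*' present): glob = one index lookup, literal = add
def pvB_go (index : PySem.Dict String (List String)) (perms : List String)
    (out : PySem.Set String) : PySem.Set String :=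
  match perms with
  | [] => out
  | p :: rest =>
    if PySem.Str.endswith p ".*" then
      pvB_go index rest
        (PySem.Set.update out (index.getD (PySem.Str.slice p none (some (-2))) []))
    else pvB_go index rest (PySem.Set.add out p)

def expand_permission_globs_py_alt (permission_codes : List String) (all_perm_codes : List String) : List String :=
  if permission_codes.contains "*" then PySem.Set.ofList all_perm_codes
  else pvB_go (pvIndexOf all_perm_codes) permission_codes PySem.Set.empty

-- ===== PRECONDITION & SPEC =====
def Spec_expand_permission_globs_py (permission_codes : List String) (all_perm_codes : List String) (out : List String) : Prop := out = expand_permission_globs_py_alt permission_codes all_perm_codes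
instance (permission_codes : List String) (all_perm_codes : List String) (out : List String) : Decidable (Spec_expand_permission_globs_py permission_codes all_perm_codes out) := by unfold Spec_expand_permission_globs_py; infer_instance

-- ===== CLAIM (what is proved, stated in full; the proofs are below) =====
def Claim_equal_expand_permission_globs_py : Prop := ∀ (permission_codes : List String) (all_perm_codes : List String), Dom_expand_permission_globs_py permission_codes all_perm_codes → Spec_expand_permission_globs_py permission_codes all_perm_codes (expand_permission_globs_py permission_codes all_perm_codes)

-- ===== LEMMAS AND PROOFS =====

-- string basics
theorem pvToList_inj (s t : String) (h : s.toList = t.toList) : s = t :=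
  String.toList_inj.mp h

-- 'c was (or will be) registered under key kl': pref(ix built so far) is a prefix of kl and
-- the rest of kl followed by '.' is a prefix of the remaining characters
def pvCondB (rest kl pl : List Char) : Bool :=
  pl.isPrefixOf kl && (kl.drop pl.length ++ ['.']).isPrefixOf rest

theorem pvCondB_cons (ch : Char) (rest kl pl : List Char) (h : kl ≠ pl ∨ ch ≠ '.') :
    pvCondB (ch :: rest) kl pl = pvCondB rest kl (pl ++ [ch]) := by
  rw [Bool.eq_iff_iff]
  simp only [pvCondB, Bool.and_eq_true, List.isPrefixOf_iff_prefix]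
  constructor
  · rintro ⟨⟨s, rfl⟩, h2⟩
    rw [List.drop_left] at h2
    cases s with
    | nil =>
      have hch : ch = '.' := by
        simp only [List.nil_append, List.cons_prefix_cons] at h2
        exact h2.1.symm
      rcases h with h | h
      · exact absurd (by simp) h
      · exact absurd hch h
    | cons c0 s' =>
      rw [List.cons_append, List.cons_prefix_cons] at h2
      obtain ⟨hc0, hs⟩ := h2
      subst hc0
      refine ⟨⟨s', by simp⟩, ?_⟩
      have he : pl ++ c0 :: s' = (pl ++ [c0]) ++ s' := by simp
      rw [he, List.drop_left]
      exact hs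
  · rintro ⟨⟨s, rfl⟩, h2⟩
    rw [List.drop_left] at h2
    refine ⟨⟨ch :: s, by simp⟩, ?_⟩
    have he : pl ++ [ch] ++ s = pl ++ (ch :: s) := by simp
    rw [he, List.drop_left]
    rw [List.cons_append, List.cons_prefix_cons]
    exact ⟨rfl, h2⟩

theorem pvCondB_nil (kl pl : List Char) : pvCondB [] kl pl = false := by
  have h : ((kl.drop pl.length ++ ['.']).isPrefixOf ([] : List Char)) = false := by
    rw [Bool.eq_false_iff]
    intro hc
    rw [List.isPrefixOf_iff_prefix] at hc
    simp at hc
  simp [pvCondB, h]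

theorem pvCondB_self (rest pl : List Char) : pvCondB ('.' :: rest) pl pl = true := by
  simp [pvCondB, List.isPrefixOf_iff_prefix]

theorem pvCondB_longer (rest kl pl : List Char) (h : kl = pl) :
    pvCondB rest kl (pl ++ ['.']) = false := by
  subst h
  have hp : ((kl ++ ['.']).isPrefixOf kl) = false := by
    rw [Bool.eq_false_iff]
    intro hc
    rw [List.isPrefixOf_iff_prefix] at hc
    have := hc.length_le
    simp at this
  simp [pvCondB, hp]

-- the inner character loop appends c to key k exactly when pvCondB holds
theorem pvIndexInner_getD (c : String) (chars : List Char) (pref : String)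
    (d : PySem.Dict String (List String)) (k : String) :
    (pvIndexInner c chars pref d).getD k []
      = d.getD k [] ++ (if pvCondB chars k.toList pref.toList then [c] else []) := by
  induction chars generalizing pref d with
  | nil => simp [pvIndexInner, pvCondB_nil]
  | cons ch rest ih =>
    unfold pvIndexInner
    by_cases hd : ch = '.'
    · subst hd
      simp only [beq_self_eq_true, if_true]
      rw [ih]
      by_cases hk : k = pref
      · subst hk
        rw [PySem.Dict.getD_modify, if_pos rfl, pvCondB_self]
        have : (k.push '.').toList = k.toList ++ ['.'] := by simp
        rw [this, pvCondB_longer _ _ _ rfl]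
        simp
      · rw [PySem.Dict.getD_modify, if_neg hk]
        have hkl : k.toList ≠ pref.toList := fun he => hk (pvToList_inj _ _ he)
        have : (pref.push '.').toList = pref.toList ++ ['.'] := by simp
        rw [this, ← pvCondB_cons '.' rest _ _ (Or.inl hkl)]
    · rw [if_neg (by simpa using hd)]
      rw [ih]
      have : (pref.push ch).toList = pref.toList ++ [ch] := by simp
      rw [this, ← pvCondB_cons ch rest _ _ (Or.inr hd)]

theorem pvCondB_start (c k : String) :
    pvCondB c.toList k.toList ("".toList) = PySem.Str.startswith c (k ++ ".") := by
  rw [Bool.eq_iff_iff]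
  have h1 : ("".toList : List Char) = [] := rfl
  have h2 : (k ++ ".").toList = k.toList ++ ['.'] := by simp
  simp [pvCondB, h1, List.isPrefixOf_iff_prefix, PySem.Chars.startswith_iff, h2]

-- the index answers key k with exactly A's filter of the candidates
theorem pvIndexOf_getD_aux (all : List String) (d : PySem.Dict String (List String)) (k : String) :
    (all.foldl (fun d c => pvIndexInner c c.toList "" d) d).getD k []
      = d.getD k [] ++ all.filter (fun c => PySem.Str.startswith c (k ++ ".")) := by
  induction all generalizing d with
  | nil => simp
  | cons c rest ih =>
    simp only [List.foldl_cons, List.filter_cons]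
    rw [ih, pvIndexInner_getD, pvCondB_start]
    cases PySem.Str.startswith c (k ++ ".") <;> simp

theorem pvIndexOf_getD (all : List String) (k : String) :
    (pvIndexOf all).getD k [] = all.filter (fun c => PySem.Str.startswith c (k ++ ".")) := by
  unfold pvIndexOf
  rw [pvIndexOf_getD_aux]
  simp [PySem.Dict.getD_empty]

-- if '*' occurs among the remaining patterns, A's loop returns set(all_perm_codes)
theorem pvA_go_star (all_perm_codes perms : List String) (out : PySem.Set String)
    (h : "*" ∈ perms) : pvA_go all_perm_codes perms out = PySem.Set.ofList all_perm_codes := by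
  induction perms generalizing out with
  | nil => cases h
  | cons p rest ih =>
    unfold pvA_go
    by_cases hp : (p == "*") = true
    · simp [hp]
    · have h2 : "*" ∈ rest := by
        rcases List.mem_cons.mp h with h1 | h2
        · subst h1; simp at hp
        · exact h2
      rw [if_neg hp]
      split <;> exact ih _ h2

-- without '*', B's index-lookup loop computes exactly A's loop
theorem pvB_go_eq (all_perm_codes perms : List String) (out : PySem.Set String)
    (h : "*" ∉ perms) :
    pvB_go (pvIndexOf all_perm_codes) perms out = pvA_go all_perm_codes perms out := by
  induction perms generalizing out with
  | nil => rfl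
  | cons p rest ih =>
    have hpne : p ≠ "*" := fun e => h (e ▸ List.mem_cons_self ..)
    have hrest : "*" ∉ rest := fun hr => h (List.mem_cons_of_mem _ hr)
    unfold pvB_go pvA_go
    rw [if_neg (show ¬((p == "*") = true) from by simpa using hpne)]
    by_cases he : PySem.Str.endswith p ".*" = true
    · rw [if_pos he, if_pos he, pvIndexOf_getD]
      exact ih _ hrest
    · rw [if_neg he, if_neg he]
      exact ih _ hrest

-- ===== VERDICT (by name: the statement is the Claim_ definition above) =====
theorem expand_permission_globs_py_spec : Claim_equal_expand_permission_globs_py := by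
  intro pc all _
  unfold Spec_expand_permission_globs_py expand_permission_globs_py expand_permission_globs_py_alt
  by_cases h : "*" ∈ pc
  · rw [pvA_go_star _ _ _ h, if_pos (by simpa using h)]
  · rw [if_neg (by simpa using h), pvB_go_eq _ _ _ h]
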